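-- pv_equiv track=rewrite | github.com/Florin14/football_tracking_be | src/modules/tournament/routes/helpers.py | validate_teams
-- ===== SOURCE A (Python) =====
-- def validate_teams(individual, player_positions, team1_high_value, team2_high_value):
--     """Ensure each team has at least one goalkeeper and an equal number of defenders."""
--     team1, team2 = [i for i, g in enumerate(individual) if g == 0], [i for i, g in enumerate(individual) if g == 1]
--
--     if sum(player_positions[i] == 'Goalkeeper' for i in team1) < 1 or sum(player_positions[i] == 'Goalkeeper' for i in team2) < 1:
--         return False
--
--     if sum(player_positions[i] == 'Defender' for i in team1) != sum(player_positions[i] == 'Defender' for i in team2):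
--         return False
--
--     if not (all(i in team1 for i in team1_high_value) and all(i in team2 for i in team2_high_value)):
--         return False
--
--     return True
-- ===== SOURCE B (Python) =====
-- def validate_teams(individual, player_positions, team1_high_value, team2_high_value):
--     """Group once into a tally dict keyed by (gene, position); read the four counts
--     out of the tally, and decide high-value membership by direct indexing into
--     individual (0 <= i < n and individual[i] == team) instead of any team list."""
--     tally = {}
--     for pair in zip(individual, player_positions):
--         tally[pair] = tally.get(pair, 0) + 1
--     n = len(individual)
--     return (tally.get((0, 'Goalkeeper'), 0) >= 1
--             and tally.get((1, 'Goalkeeper'), 0) >= 1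
--             and tally.get((0, 'Defender'), 0) == tally.get((1, 'Defender'), 0)
--             and all(0 <= i < n and individual[i] == 0 for i in team1_high_value)
--             and all(0 <= i < n and individual[i] == 1 for i in team2_high_value))
-- ===== Notes on version B (the rewrite author's own statement) =====
-- stated objective: alternative
-- what changed: Instead of building team index lists and scanning them repeatedly (two enumerate-filter comprehensions, four indicator sums, linear `i in team` membership scans), B does one grouping pass into a dict tally keyed by (gene, position), reads the four role counts straight out of the tally, and decides high-value membership by direct indexing (0 <= i < n and individual[i] == team), so team lists and membership scans disappear entirely.
-- outside the precondition, e.g. on validate_teams([0, 1], ['Defender'], [], []): A returns False, B returns False; on validate_teams([0], [], [], []): A raises IndexError, B returns False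
import Mathlib
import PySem

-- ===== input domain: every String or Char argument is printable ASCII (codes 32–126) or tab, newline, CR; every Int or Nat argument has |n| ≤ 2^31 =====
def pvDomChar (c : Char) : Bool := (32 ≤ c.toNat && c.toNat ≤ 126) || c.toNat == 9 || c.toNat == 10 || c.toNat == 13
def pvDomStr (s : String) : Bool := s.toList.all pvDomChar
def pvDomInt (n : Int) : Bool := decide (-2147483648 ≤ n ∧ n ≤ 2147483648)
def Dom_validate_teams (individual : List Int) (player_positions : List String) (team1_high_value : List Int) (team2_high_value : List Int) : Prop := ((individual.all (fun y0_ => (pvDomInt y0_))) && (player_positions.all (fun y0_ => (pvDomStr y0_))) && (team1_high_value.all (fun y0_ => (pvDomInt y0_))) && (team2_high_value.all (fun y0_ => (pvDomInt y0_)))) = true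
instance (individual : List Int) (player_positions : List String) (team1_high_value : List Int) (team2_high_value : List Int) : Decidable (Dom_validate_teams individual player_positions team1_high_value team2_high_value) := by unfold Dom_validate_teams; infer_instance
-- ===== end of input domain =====

-- B replaces A's team index lists and repeated scans by one grouping pass into a
-- (gene, position)-keyed tally dict plus direct indexing for the high-value checks
-- (objective: alternative).

-- ===== PORT A =====
-- player_positions[i] is ported with pyGetD; exact under Pre_ (which excludes the IndexError inputs).
def validate_teams (individual : List Int) (player_positions : List String) (team1_high_value : List Int) (team2_high_value : List Int) : Bool :=
  let team1 := ((PySem.List.enumerate individual).filter (fun p => p.2 == 0)).map (fun p => p.1)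
  let team2 := ((PySem.List.enumerate individual).filter (fun p => p.2 == 1)).map (fun p => p.1)
  let gk1 : Int := team1.foldl (fun acc i => if PySem.List.pyGetD player_positions i "" == "Goalkeeper" then acc + 1 else acc) 0
  let gk2 : Int := team2.foldl (fun acc i => if PySem.List.pyGetD player_positions i "" == "Goalkeeper" then acc + 1 else acc) 0
  if gk1 < 1 ∨ gk2 < 1 then false
  else
    let df1 : Int := team1.foldl (fun acc i => if PySem.List.pyGetD player_positions i "" == "Defender" then acc + 1 else acc) 0
    let df2 : Int := team2.foldl (fun acc i => if PySem.List.pyGetD player_positions i "" == "Defender" then acc + 1 else acc) 0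
    if df1 ≠ df2 then false
    else if ¬(team1_high_value.all (fun i => team1.contains i) && team2_high_value.all (fun i => team2.contains i)) then false
    else true

-- ===== PORT B =====
-- faithful to Source B: the tally loop 'tally[pair] = tally.get(pair, 0) + 1' over zip(individual, player_positions),
-- four tally.get reads, and the direct-index membership tests (the pyGetD default 2 is unreachable: it sits
-- behind the 0 <= i < n bound guards, exactly like Python's short-circuiting `and` before individual[i]).
def validate_teams_alt (individual : List Int) (player_positions : List String) (team1_high_value : List Int) (team2_high_value : List Int) : Bool :=
  let tally : PySem.Dict (Int × String) Int :=
    (individual.zip player_positions).foldl (fun d x => d.insert x (d.getD x 0 + 1)) PySem.Dict.empty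
  let n : Int := individual.length
  decide (1 ≤ tally.getD ((0 : Int), "Goalkeeper") 0)
    && decide (1 ≤ tally.getD ((1 : Int), "Goalkeeper") 0)
    && (tally.getD ((0 : Int), "Defender") 0 == tally.getD ((1 : Int), "Defender") 0)
    && team1_high_value.all (fun i => decide (0 ≤ i) && decide (i < n) && (PySem.List.pyGetD individual i 2 == 0))
    && team2_high_value.all (fun i => decide (0 ≤ i) && decide (i < n) && (PySem.List.pyGetD individual i 2 == 1))

-- ===== PRECONDITION & SPEC =====
-- Pre_ excludes inputs where some index placed on team 0 or 1 is out of range of player_positions: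
-- there A either raises IndexError, or (when team 0 already lacks a goalkeeper) short-circuits to
-- False before reaching the bad index — a slightly narrower corner on which both programs return False.
def Pre_validate_teams (individual : List Int) (player_positions : List String) (team1_high_value : List Int) (team2_high_value : List Int) : Prop :=
  ∀ (k : Nat) (h : k < individual.length), (individual[k] = 0 ∨ individual[k] = 1) → k < player_positions.length
instance (individual : List Int) (player_positions : List String) (team1_high_value : List Int) (team2_high_value : List Int) : Decidable (Pre_validate_teams individual player_positions team1_high_value team2_high_value) := by unfold Pre_validate_teams; infer_instance
def pvWitness_validate_teams : List Int × List String × List Int × List Int :=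
  ([0, 1], ["Goalkeeper", "Goalkeeper"], [], [])

def Spec_validate_teams (individual : List Int) (player_positions : List String) (team1_high_value : List Int) (team2_high_value : List Int) (out : Bool) : Prop := out = validate_teams_alt individual player_positions team1_high_value team2_high_value
instance (individual : List Int) (player_positions : List String) (team1_high_value : List Int) (team2_high_value : List Int) (out : Bool) : Decidable (Spec_validate_teams individual player_positions team1_high_value team2_high_value out) := by unfold Spec_validate_teams; infer_instance

-- ===== CLAIM (what is proved, stated in full; the proofs are below) =====
def Claim_equal_validate_teams : Prop := ∀ (individual : List Int) (player_positions : List String) (team1_high_value : List Int) (team2_high_value : List Int), Dom_validate_teams individual player_positions team1_high_value team2_high_value → Pre_validate_teams individual player_positions team1_high_value team2_high_value → Spec_validate_teams individual player_positions team1_high_value team2_high_value (validate_teams individual player_positions team1_high_value team2_high_value)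

-- ===== LEMMAS AND PROOFS =====

-- if no gene is 0 or 1, the filtered enumerate is empty
theorem enum_filter_nil (ind : List Int) (s b : Int) (hb : b = 0 ∨ b = 1)
    (h : ∀ (k : Nat) (hk : k < ind.length), ¬(ind[k] = 0 ∨ ind[k] = 1)) :
    (PySem.List.enumerate ind s).filter (fun p => p.2 == b) = [] := by
  induction ind generalizing s with
  | nil => simp [PySem.List.enumerate_nil]
  | cons g tl ih =>
    have h0 := h 0 (by simp)
    simp only [List.getElem_cons_zero] at h0
    have hgb : (g == b) = false := by
      rcases hb with rfl | rfl <;> simp_all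
    simp only [PySem.List.enumerate_cons, List.filter_cons, hgb]
    exact ih (s + 1) (fun k hk => by have := h (k + 1) (by simpa using Nat.succ_lt_succ hk); simpa using this)

-- the bridge: A's (index, position looked up in the full list) pairs over the filtered enumerate of
-- individual coincide, under Pre_, with the pairs read off the enumerate of the zip.
theorem bridge (ind : List Int) (pre suf : List String) (b : Int) (hb : b = 0 ∨ b = 1)
    (h : ∀ (k : Nat) (hk : k < ind.length), (ind[k] = 0 ∨ ind[k] = 1) → k < suf.length) :
    ((PySem.List.enumerate ind (pre.length : Int)).filter (fun p => p.2 == b)).map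
        (fun p => (p.1, PySem.List.pyGetD (pre ++ suf) p.1 "")) =
      ((PySem.List.enumerate (ind.zip suf) (pre.length : Int)).filter (fun p => p.2.1 == b)).map
        (fun p => (p.1, p.2.2)) := by
  induction ind generalizing pre suf with
  | nil => simp [PySem.List.enumerate_nil]
  | cons g tl ih =>
    cases suf with
    | nil =>
      have hnone : ∀ (k : Nat) (hk : k < (g :: tl).length), ¬((g :: tl)[k] = 0 ∨ (g :: tl)[k] = 1) := by
        intro k hk hor
        exact absurd (h k hk hor) (by simp)
      rw [enum_filter_nil (g :: tl) _ b hb hnone]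
      simp
    | cons p suf =>
      have hget : PySem.List.pyGetD (pre ++ p :: suf) (pre.length : Int) "" = p := by
        simp [PySem.List.pyGetD_natCast, List.getD_eq_getElem?_getD]
      have hlen : ((pre ++ [p]).length : Int) = (pre.length : Int) + 1 := by
        simp [List.length_append]
      have happ : pre ++ p :: suf = (pre ++ [p]) ++ suf := by simp
      have ihx := ih (pre ++ [p]) suf
        (fun k hk hor => by
          have := h (k + 1) (by simpa using Nat.succ_lt_succ hk) (by simpa using hor)
          simpa using this)
      rw [hlen] at ihx
      simp only [PySem.List.enumerate_cons, List.zip_cons_cons, List.filter_cons]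
      by_cases hgb : g = b
      · simp only [hgb, beq_self_eq_true, if_true, List.map_cons, hget]
        rw [happ, ihx]
      · have : (g == b) = false := by simp [hgb]
        simp only [this, Bool.false_eq_true, if_false]
        rw [happ, ihx]

-- counting a predicate on the element through enumerate is counting it on the list
theorem countP_enumerate {α : Type} (l : List α) (s : Int) (pred : α → Bool) :
    (PySem.List.enumerate l s).countP (fun p => pred p.2) = l.countP pred := by
  induction l generalizing s with
  | nil => simp [PySem.List.enumerate_nil]
  | cons x tl ih => simp [PySem.List.enumerate_cons, List.countP_cons, ih]

-- the BEq test against a literal pair, componentwise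
theorem count_pair (l : List (Int × String)) (b : Int) (q : String) :
    l.count (b, q) = l.countP (fun p => p.1 == b && p.2 == q) := by
  rw [List.count_eq_countP]
  apply List.countP_congr
  intro p _
  obtain ⟨x, y⟩ := p
  constructor <;> intro hp <;> simp_all [Prod.ext_iff]

-- membership in A's team list, characterised by direct indexing
theorem mem_team_iff (ind : List Int) (s i b : Int) :
    i ∈ ((PySem.List.enumerate ind s).filter (fun p => p.2 == b)).map (fun p => p.1) ↔
      ∃ (k : Nat) (_ : k < ind.length), i = s + k ∧ ind[k] = b := by
  induction ind generalizing s with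
  | nil => simp [PySem.List.enumerate_nil]
  | cons g tl ih =>
    simp only [PySem.List.enumerate_cons, List.filter_cons]
    constructor
    · intro hmem
      by_cases hgb : (g == b) = true
      · simp only [hgb, if_true, List.map_cons, List.mem_cons] at hmem
        rcases hmem with rfl | hmem
        · exact ⟨0, by simp, by simp, by simpa using beq_iff_eq.mp hgb⟩
        · obtain ⟨k, hk, hik, hv⟩ := (ih (s + 1)).mp hmem
          exact ⟨k + 1, by simpa using Nat.succ_lt_succ hk, by push_cast at hik ⊢; omega, by simpa using hv⟩
      · simp only [hgb] at hmem
        obtain ⟨k, hk, hik, hv⟩ := (ih (s + 1)).mp hmem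
        exact ⟨k + 1, by simpa using Nat.succ_lt_succ hk, by push_cast at hik ⊢; omega, by simpa using hv⟩
    · rintro ⟨k, hk, rfl, hv⟩
      cases k with
      | zero =>
        simp only [List.getElem_cons_zero] at hv
        simp [hv]
      | succ k =>
        have hmem := (ih (s + 1)).mpr ⟨k, by simpa using Nat.lt_of_succ_lt_succ hk, by push_cast; ring, by simpa using hv⟩
        by_cases hgb : (g == b) = true
        · simp only [hgb, if_true, List.map_cons, List.mem_cons]
          exact Or.inr hmem
        · simpa [hgb] using hmem

-- A's contains test on a team list equals B's direct-index test
theorem contains_eq_index (ind : List Int) (i b : Int) :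
    (((PySem.List.enumerate ind 0).filter (fun p => p.2 == b)).map (fun p => p.1)).contains i =
      (decide (0 ≤ i) && decide (i < (ind.length : Int)) && (PySem.List.pyGetD ind i 2 == b)) := by
  by_cases hm : i ∈ ((PySem.List.enumerate ind 0).filter (fun p => p.2 == b)).map (fun p => p.1)
  · obtain ⟨k, hk, hik, hv⟩ := (mem_team_iff ind 0 i b).mp hm
    have hlo : 0 ≤ i := by omega
    have hhi : i < (ind.length : Int) := by omega
    have hkn : i.toNat = k := by omega
    have hget : PySem.List.pyGetD ind i 2 = ind[k] := by
      conv_lhs => rw [show i = ((k : Nat) : Int) by omega]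
      rw [PySem.List.pyGetD_natCast]
      simp [List.getD_eq_getElem?_getD, hk]
    have hc : (((PySem.List.enumerate ind 0).filter (fun p => p.2 == b)).map (fun p => p.1)).contains i = true :=
      List.elem_eq_true_of_mem hm
    rw [hc, hget]
    simp [hlo, hhi, hv]
  · have hc : (((PySem.List.enumerate ind 0).filter (fun p => p.2 == b)).map (fun p => p.1)).contains i = false := by
      cases hc : (((PySem.List.enumerate ind 0).filter (fun p => p.2 == b)).map (fun p => p.1)).contains i with
      | false => rfl
      | true => exact absurd (List.mem_of_elem_eq_true hc) hm
    rw [hc]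
    by_cases hlo : 0 ≤ i
    · by_cases hhi : i < (ind.length : Int)
      · have hklt : i.toNat < ind.length := by omega
        have hget : PySem.List.pyGetD ind i 2 = ind[i.toNat] := by
          conv_lhs => rw [show i = ((i.toNat : Nat) : Int) by omega]
          rw [PySem.List.pyGetD_natCast]
          simp [List.getD_eq_getElem?_getD, hklt]
        have hv : ¬ ind[i.toNat] = b := by
          intro hv
          exact hm ((mem_team_iff ind 0 i b).mpr ⟨i.toNat, hklt, by omega, hv⟩)
        simp [hlo, hhi, hget, hv]
      · simp [hhi]
    · simp [hlo]

-- the final guard chain of A equals B's conjunction, for equal counts and membership tests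
theorem finalBool (c0 c1 d0 d1 : Nat) (a b : Bool) :
    (if 0 + (c0 : Int) < 1 ∨ 0 + (c1 : Int) < 1 then false
     else if 0 + (d0 : Int) ≠ 0 + (d1 : Int) then false
     else if ¬(a && b) = true then false else true) =
    (decide (1 ≤ (c0 : Int)) && decide (1 ≤ (c1 : Int)) && ((d0 : Int) == (d1 : Int)) && a && b) := by
  split_ifs <;> cases a <;> cases b <;> simp_all <;> omega

-- ===== VERDICT (by name: the statement is the Claim_ definition above) =====
theorem validate_teams_spec : Claim_equal_validate_teams := by
  intro ind pos hv1 hv2 hdom hpre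
  unfold Spec_validate_teams
  simp only [validate_teams, validate_teams_alt]
  rw [PySem.Dict.foldl_insert_getD_add_one_eq_counter]
  simp only [PySem.Dict.getD_counter, count_pair]
  -- A's team counts become counts over the zip, via the bridge
  have hb0 := bridge ind [] pos 0 (Or.inl rfl) hpre
  have hb1 := bridge ind [] pos 1 (Or.inr rfl) hpre
  have h00 : ((List.length ([] : List String)) : Int) = 0 := rfl
  rw [h00] at hb0 hb1
  simp only [List.nil_append] at hb0 hb1
  have hcount : ∀ (b : Int), b = 0 ∨ b = 1 → ∀ (q : String),
      ((PySem.List.enumerate ind 0).filter (fun p => p.2 == b)).countP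
          (fun p => PySem.List.pyGetD pos p.1 "" == q) =
        (ind.zip pos).countP (fun p => p.1 == b && p.2 == q) := by
    intro b hb q
    have hbq := bridge ind [] pos b hb hpre
    rw [h00] at hbq
    simp only [List.nil_append] at hbq
    have hq := congrArg (List.countP (fun x : Int × String => x.2 == q)) hbq
    simp only [List.countP_map, Function.comp_def] at hq
    rw [hq, List.countP_filter,
        countP_enumerate (ind.zip pos) 0 (fun y : Int × String => y.2 == q && y.1 == b)]
    apply List.countP_congr
    intro p _
    rw [Bool.and_comm]
  simp only [PySem.List.foldl_if_add_one, List.countP_map, Function.comp_def]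
  rw [hcount 0 (Or.inl rfl) "Goalkeeper", hcount 1 (Or.inr rfl) "Goalkeeper",
      hcount 0 (Or.inl rfl) "Defender", hcount 1 (Or.inr rfl) "Defender"]
  -- membership: A's contains tests become B's direct-index tests
  have hall : ∀ (l : List Int) (b : Int),
      l.all (fun i => (((PySem.List.enumerate ind 0).filter (fun p => p.2 == b)).map (fun p => p.1)).contains i) =
        l.all (fun i => decide (0 ≤ i) && decide (i < (ind.length : Int)) && (PySem.List.pyGetD ind i 2 == b)) := by
    intro l b
    induction l with
    | nil => rfl
    | cons x tl ih => simp only [List.all_cons, ih, contains_eq_index ind x b]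
  rw [hall hv1 0, hall hv2 1]
  generalize hv1.all _ = a
  generalize hv2.all _ = bb
  generalize (ind.zip pos).countP (fun p => p.1 == 0 && p.2 == "Goalkeeper") = c0
  generalize (ind.zip pos).countP (fun p => p.1 == 1 && p.2 == "Goalkeeper") = c1
  generalize (ind.zip pos).countP (fun p => p.1 == 0 && p.2 == "Defender") = d0
  generalize (ind.zip pos).countP (fun p => p.1 == 1 && p.2 == "Defender") = d1
  exact finalBool c0 c1 d0 d1 a bb
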